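-- pv_equiv track=rewrite | github.com/pypi-data/pypi-mirror-373 | packages/onco-cola-utils/onco_cola_utils-0.2.4.tar.gz/onco_cola_utils-0.2.4/src/onco_cola_utils/tools/core.py | get_most_longer_word_of_list
-- ===== SOURCE A (Python) =====
-- def get_most_longer_word_of_list(words_list):
--     """
--     Метод, который выбирает самое длинное название из списка.
--     Если таких несколько - сортируем по алфавиту.
--
--     :param words_list: Список слов
--     :return: Самое длинное слово или первое из самых длинных, если их несколько
--     """
--     if not words_list:
--         return None
--
--     # Находим максимальную длину слова
--     max_length = max(len(word) for word in words_list)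
--
--     # Собираем список всех слов максимальной длины
--     longest_words = [word for word in words_list if len(word) == max_length]
--
--     # Если одно слово, возвращаем его
--     if len(longest_words) == 1:
--         return longest_words[0]
--     else:
--         # Если несколько слов одной длины, сортируем по алфавиту и берем первое
--         return sorted(longest_words)[0]
-- ===== SOURCE B (Python) =====
-- def get_most_longer_word_of_list(words_list):
--     """One-pass selection: keep the best candidate (longest, ties -> alphabetically smallest)."""
--     best = None
--     for w in words_list:
--         if best is None or len(w) > len(best) or (len(w) == len(best) and w < best):
--             best = w
--     return best
-- ===== Notes on version B (the rewrite author's own statement) =====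
-- stated objective: simpler
-- what changed: Replaces A's three passes (max length, filter of longest words, sort-and-take-first) with a single left-to-right pass that keeps the current best candidate under the key (longest, then alphabetically smallest).
import Mathlib
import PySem

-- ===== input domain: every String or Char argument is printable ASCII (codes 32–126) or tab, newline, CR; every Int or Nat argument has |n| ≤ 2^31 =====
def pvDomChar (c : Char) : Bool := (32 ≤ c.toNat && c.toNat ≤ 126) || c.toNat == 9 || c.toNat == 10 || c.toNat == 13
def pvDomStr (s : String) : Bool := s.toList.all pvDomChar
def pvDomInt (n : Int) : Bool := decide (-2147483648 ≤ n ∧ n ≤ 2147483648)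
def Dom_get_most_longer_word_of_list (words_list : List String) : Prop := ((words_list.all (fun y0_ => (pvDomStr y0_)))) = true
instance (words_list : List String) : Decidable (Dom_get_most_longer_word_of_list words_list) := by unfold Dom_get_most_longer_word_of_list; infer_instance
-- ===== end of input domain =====

-- B replaces A's three passes (max length, filter, sort-and-take-first) by one pass keeping the best candidate (simpler; same result).


-- ===== PORT A =====
def get_most_longer_word_of_list (words_list : List String) : Option String :=
  if words_list = [] then none
  else
    match PySem.List.max? (words_list.map (fun word => PySem.Str.len word)) (fun x => x) with
    | none => none  -- unreachable: the guard ensures the list is nonempty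
    | some max_length =>
      let longest_words := words_list.filter (fun word => PySem.Str.len word == max_length)
      if longest_words.length = 1 then longest_words.head?
      else (PySem.List.sorted longest_words (fun x => x) false).head?

-- ===== PORT B =====
def get_most_longer_word_of_list_alt (words_list : List String) : Option String :=
  words_list.foldl (fun best w =>
    match best with
    | none => some w
    | some b =>
      if PySem.Str.len w > PySem.Str.len b ∨ (PySem.Str.len w = PySem.Str.len b ∧ w < b)
      then some w else some b) none

-- ===== PRECONDITION & SPEC =====
def Spec_get_most_longer_word_of_list (words_list : List String) (out : Option String) : Prop := out = get_most_longer_word_of_list_alt words_list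
instance (words_list : List String) (out : Option String) : Decidable (Spec_get_most_longer_word_of_list words_list out) := by unfold Spec_get_most_longer_word_of_list; infer_instance

-- ===== CLAIM (what is proved, stated in full; the proofs are below) =====
def Claim_equal_get_most_longer_word_of_list : Prop := ∀ (words_list : List String), Dom_get_most_longer_word_of_list words_list → Spec_get_most_longer_word_of_list words_list (get_most_longer_word_of_list words_list)

-- ===== LEMMAS AND PROOFS =====

/-- "w is at least as good a candidate as x": longer, or same length and alphabetically ≤. -/
def pvKle (w x : String) : Prop :=
  PySem.Str.len x < PySem.Str.len w ∨ (PySem.Str.len w = PySem.Str.len x ∧ w ≤ x)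

theorem pvKle_refl (w : String) : pvKle w w := Or.inr ⟨rfl, le_refl w⟩

theorem pvKle_trans {a b c : String} (h1 : pvKle a b) (h2 : pvKle b c) : pvKle a c := by
  rcases h1 with h1 | ⟨h1, h1'⟩ <;> rcases h2 with h2 | ⟨h2, h2'⟩
  · exact Or.inl (lt_trans h2 h1)
  · exact Or.inl (h2 ▸ h1)
  · exact Or.inl (h1 ▸ h2)
  · exact Or.inr ⟨h1.trans h2, le_trans h1' h2'⟩

theorem pvKle_antisymm {a b : String} (h1 : pvKle a b) (h2 : pvKle b a) : a = b := by
  rcases h1 with h1 | ⟨h1, h1'⟩ <;> rcases h2 with h2 | ⟨h2, h2'⟩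
  · exact absurd h1 (lt_asymm h2)
  · exact absurd h1 (h2 ▸ lt_irrefl _)
  · exact absurd h2 (h1 ▸ lt_irrefl _)
  · exact le_antisymm h1' h2'

theorem pvKle_total_of_not {w b : String}
    (h : ¬ (PySem.Str.len b < PySem.Str.len w ∨ (PySem.Str.len w = PySem.Str.len b ∧ w < b))) :
    pvKle b w := by
  rcases lt_trichotomy (PySem.Str.len w) (PySem.Str.len b) with hlt | heq | hgt
  · exact Or.inl hlt
  · refine Or.inr ⟨heq.symm, ?_⟩
    rcases le_or_gt b w with hle | hgt
    · exact hle
    · exact absurd (Or.inr ⟨heq, hgt⟩) h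
  · exact absurd (Or.inl hgt) h

/-- B's loop invariant: starting from `some b`, the fold returns the best element of `b :: ws`. -/
theorem pvB_loop (ws : List String) (b : String) :
    ∃ c, ws.foldl (fun best w =>
        match best with
        | none => some w
        | some b =>
          if PySem.Str.len w > PySem.Str.len b ∨ (PySem.Str.len w = PySem.Str.len b ∧ w < b)
          then some w else some b) (some b) = some c ∧
      c ∈ b :: ws ∧ ∀ x ∈ b :: ws, pvKle c x := by
  induction ws generalizing b with
  | nil => exact ⟨b, rfl, by simp, by
      intro x hx; simp at hx; subst hx; exact pvKle_refl _⟩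
  | cons w t ih =>
    simp only [List.foldl_cons]
    by_cases h : PySem.Str.len w > PySem.Str.len b ∨ (PySem.Str.len w = PySem.Str.len b ∧ w < b)
    · simp only [if_pos h]
      obtain ⟨c, hc, hmem, hbest⟩ := ih w
      refine ⟨c, hc, ?_, ?_⟩
      · rcases List.mem_cons.mp hmem with hEq | h'
        · subst hEq; simp
        · simp [h']
      · intro x hx
        rcases List.mem_cons.mp hx with hEq | hx
        · -- x = b : c ≤ w ≤ b
          subst hEq
          refine pvKle_trans (hbest w (by simp)) ?_
          rcases h with h | ⟨h, h'⟩
          · exact Or.inl h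
          · exact Or.inr ⟨h, le_of_lt h'⟩
        · exact hbest x hx
    · simp only [if_neg h]
      obtain ⟨c, hc, hmem, hbest⟩ := ih b
      refine ⟨c, hc, ?_, ?_⟩
      · rcases List.mem_cons.mp hmem with hEq | h'
        · subst hEq; simp
        · simp [h']
      · intro x hx
        rcases List.mem_cons.mp hx with hEq | hx
        · subst hEq; exact hbest x (by simp)
        · rcases List.mem_cons.mp hx with hEq | hx
          · subst hEq; exact pvKle_trans (hbest b (by simp)) (pvKle_total_of_not h)
          · exact hbest x (List.mem_cons_of_mem _ hx)

theorem pvB_spec (w : String) (t : List String) :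
    ∃ c, get_most_longer_word_of_list_alt (w :: t) = some c ∧
      c ∈ w :: t ∧ ∀ x ∈ w :: t, pvKle c x := by
  have := pvB_loop t w
  simpa [get_most_longer_word_of_list_alt] using this

theorem pvA_spec (ws : List String) (hne : ws ≠ []) :
    ∃ a, get_most_longer_word_of_list ws = some a ∧
      a ∈ ws ∧ ∀ x ∈ ws, pvKle a x := by
  unfold get_most_longer_word_of_list
  rw [if_neg hne]
  have hmapne : ws.map (fun word => PySem.Str.len word) ≠ [] := by
    simpa using hne
  cases hM : PySem.List.max? (ws.map (fun word => PySem.Str.len word)) (fun x => x) with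
  | none => exact absurd ((PySem.List.max?_eq_none_iff _ _).mp hM) hmapne
  | some M =>
    have hMmem : M ∈ ws.map (fun word => PySem.Str.len word) := PySem.List.max?_mem hM
    have hMmax : ∀ y ∈ ws.map (fun word => PySem.Str.len word), y ≤ M := by
      intro y hy; exact PySem.List.max?_isMax hM y hy
    obtain ⟨a0, ha0mem, ha0len⟩ := List.mem_map.mp hMmem
    show ∃ a, (if (ws.filter (fun word => PySem.Str.len word == M)).length = 1
        then (ws.filter (fun word => PySem.Str.len word == M)).head?
        else (PySem.List.sorted (ws.filter (fun word => PySem.Str.len word == M)) (fun x => x) false).head?) = some a ∧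
      a ∈ ws ∧ ∀ x ∈ ws, pvKle a x
    have hlen_le : ∀ x ∈ ws, PySem.Str.len x ≤ M := fun x hx =>
      hMmax _ (List.mem_map.mpr ⟨x, hx, rfl⟩)
    have ha0l : a0 ∈ ws.filter (fun word => PySem.Str.len word == M) :=
      List.mem_filter.mpr ⟨ha0mem, beq_iff_eq.mpr ha0len⟩
    have hlne : ws.filter (fun word => PySem.Str.len word == M) ≠ [] :=
      fun h => by rw [h] at ha0l; exact absurd ha0l (List.not_mem_nil)
    -- any member of longest that is ≤ all of longest is best over all of ws
    have hgen : ∀ m, m ∈ ws.filter (fun word => PySem.Str.len word == M) →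
        (∀ y ∈ ws.filter (fun word => PySem.Str.len word == M), m ≤ y) →
        m ∈ ws ∧ ∀ x ∈ ws, pvKle m x := by
      intro m hm hmin
      obtain ⟨hmw, hmlen⟩ := List.mem_filter.mp hm
      have hmlen' : PySem.Str.len m = M := beq_iff_eq.mp hmlen
      refine ⟨hmw, fun x hx => ?_⟩
      rcases lt_or_eq_of_le (hlen_le x hx) with hlt | heq
      · exact Or.inl (hmlen' ▸ hlt)
      · have hxl : x ∈ ws.filter (fun word => PySem.Str.len word == M) :=
          List.mem_filter.mpr ⟨hx, beq_iff_eq.mpr heq⟩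
        exact Or.inr ⟨by rw [hmlen', heq], hmin x hxl⟩
    by_cases h1 : (ws.filter (fun word => PySem.Str.len word == M)).length = 1
    · rw [if_pos h1]
      obtain ⟨a, ha⟩ := List.length_eq_one_iff.mp h1
      have haMem : a ∈ ws.filter (fun word => PySem.Str.len word == M) := by
        rw [ha]; simp
      obtain ⟨h2, h3⟩ := hgen a haMem (by
        intro y hy; rw [ha] at hy; simp at hy; subst hy; rfl)
      exact ⟨a, by rw [ha]; rfl, h2, h3⟩
    · rw [if_neg h1]
      cases hs : PySem.List.sorted (ws.filter (fun word => PySem.Str.len word == M)) (fun x => x) with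
      | nil => exact absurd ((PySem.List.sorted_eq_nil_iff _ _ _).mp hs) hlne
      | cons m t =>
        have hmmem : m ∈ ws.filter (fun word => PySem.Str.len word == M) := by
          have := (PySem.List.mem_sorted (ws.filter (fun word => PySem.Str.len word == M))
            (fun x => x) false m)
          rw [hs] at this
          exact this.mp (by simp)
        have hmin : ∀ y ∈ ws.filter (fun word => PySem.Str.len word == M), m ≤ y :=
          PySem.List.key_head_sorted_le _ _ hs
        obtain ⟨h2, h3⟩ := hgen m hmmem hmin
        exact ⟨m, rfl, h2, h3⟩

-- ===== VERDICT (by name: the statement is the Claim_ definition above) =====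
theorem get_most_longer_word_of_list_spec : Claim_equal_get_most_longer_word_of_list := by
  intro ws _
  unfold Spec_get_most_longer_word_of_list
  cases ws with
  | nil => rfl
  | cons w t =>
    obtain ⟨a, hA, haMem, haBest⟩ := pvA_spec (w :: t) (by simp)
    obtain ⟨c, hB, hcMem, hcBest⟩ := pvB_spec w t
    rw [hA, hB]
    exact congrArg some (pvKle_antisymm (haBest c hcMem) (hcBest a haMem))
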